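-- pv_equiv track=rewrite | github.com/ashm8206/Leeting | 1818-maximum-score-from-removing-substrings/maximum-score-from-removing-substrings.py | remove_substring
-- ===== SOURCE A (Python) =====
-- def remove_substring(input: str, target_pair: str) -> str:
--     stack = []
--
--     for ch in input:
--         if (
--             ch == target_pair[1]
--             and stack
--             and stack[-1] == target_pair[0]
--         ):
--             stack.pop()  # Remove the matching character from the stack
--         else:
--             stack.append(ch)
--
--     # Reconstruct the remaining string after removing target pairs
--     return "".join(stack)
-- ===== SOURCE B (Python) =====
-- def remove_substring(input: str, target_pair: str) -> str:
--     if not input: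
--         return input
--     pair = target_pair[0] + target_pair[1]
--     while pair in input:
--         input = input.replace(pair, "")
--     return input
-- ===== Notes on version B (the rewrite author's own statement) =====
-- stated objective: idiomatic
-- what changed: Replaces A's explicit character stack with the idiomatic repeated str.replace: delete every occurrence of the two-char pair and loop until the pair no longer occurs (correct because single-pair deletion is confluent).
import Mathlib
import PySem

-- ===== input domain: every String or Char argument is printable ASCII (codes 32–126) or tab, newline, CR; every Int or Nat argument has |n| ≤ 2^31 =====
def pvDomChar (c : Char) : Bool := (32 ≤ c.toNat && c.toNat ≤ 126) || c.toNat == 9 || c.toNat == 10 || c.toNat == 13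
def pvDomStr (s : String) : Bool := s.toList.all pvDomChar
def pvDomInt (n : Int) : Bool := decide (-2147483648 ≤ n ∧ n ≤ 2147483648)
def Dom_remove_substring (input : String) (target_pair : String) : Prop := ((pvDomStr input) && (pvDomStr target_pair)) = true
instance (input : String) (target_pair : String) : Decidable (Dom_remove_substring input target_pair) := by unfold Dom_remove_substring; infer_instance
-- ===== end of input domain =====

-- B replaces A's explicit character stack by repeatedly deleting all occurrences of the
-- two-char pair with str.replace until none remains (idiomatic; not claimed faster).

-- ===== PORT A =====
-- the for-loop over input with the explicit stack (stack stored top-first; join = reverse)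
def pvLoopA (a b : Char) : List Char → List Char → List Char
  | st, [] => st.reverse
  | st, c :: cs =>
    if c = b ∧ st.head? = some a then pvLoopA a b st.tail cs
    else pvLoopA a b (c :: st) cs

def remove_substring (input : String) (target_pair : String) : String :=
  match input.toList with
  | [] => ""  -- loop body never runs: target_pair is never indexed, "".join([]) = ""
  | c :: cs =>
    match PySem.Str.pyGet? target_pair 0, PySem.Str.pyGet? target_pair 1 with
    | some a, some b => String.ofList (pvLoopA a b [] (c :: cs))
    | _, _ => ""  -- IndexError in Python; excluded by Pre_

-- ===== PORT B =====
-- hand ports of `pair in input` and `input.replace(pair, "")`, exact for a 2-char pattern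
-- [a,b]: left-to-right scan, a match is skipped entirely (Python resumes after the match)
def pvOcc (a b : Char) : List Char → Bool
  | c :: cs => (c == a && cs.head? == some b) || pvOcc a b cs
  | [] => false

def pvRepl (a b : Char) : List Char → List Char
  | c :: d :: rest => if c = a ∧ d = b then pvRepl a b rest else c :: pvRepl a b (d :: rest)
  | l => l

theorem pvRepl_length_le (a b : Char) : ∀ l : List Char, (pvRepl a b l).length ≤ l.length := by
  intro l
  induction l using pvRepl.induct a b with
  | case1 c d rest hcd ih => simp only [pvRepl, if_pos hcd]; simp; omega
  | case2 c d rest hcd ih => simp only [pvRepl, if_neg hcd]; simp at ih ⊢; omega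
  | case3 l h1 => simp [pvRepl]


theorem pvRepl_length_lt (a b : Char) (l : List Char) (h : pvOcc a b l = true) :
    (pvRepl a b l).length < l.length := by
  induction l using pvRepl.induct a b with
  | case1 c d rest hcd ih =>
    simp only [pvRepl, if_pos hcd]
    have := pvRepl_length_le a b rest
    simp; omega
  | case2 c d rest hcd ih =>
    simp only [pvRepl, if_neg hcd]
    simp only [pvOcc, List.head?_cons] at h
    have hocc : pvOcc a b (d :: rest) = true := by
      rcases Bool.or_eq_true_iff.mp h with h1 | h1
      · exfalso; apply hcd
        simp at h1
        exact ⟨h1.1, h1.2⟩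
      · exact h1
    have := ih hocc
    simp at this ⊢; omega
  | case3 l h1 =>
    exfalso
    rcases l with _ | ⟨c, _ | ⟨d, t⟩⟩
    · simp [pvOcc] at h
    · simp [pvOcc] at h
    · exact h1 c d t rfl


-- the while-loop: replace all occurrences, repeat while the pair still occurs
def pvWhileB (a b : Char) (l : List Char) : List Char :=
  if hocc : pvOcc a b l = true then pvWhileB a b (pvRepl a b l) else l
termination_by l.length
decreasing_by exact pvRepl_length_lt a b l hocc

def remove_substring_alt (input : String) (target_pair : String) : String :=
  if input = "" then input
  else
    match PySem.Str.pyGet? target_pair 0 with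
    | none => ""  -- IndexError in Python; excluded by Pre_
    | some a =>
      match PySem.Str.pyGet? target_pair 1 with
      | none => ""  -- IndexError in Python; excluded by Pre_
      | some b => String.ofList (pvWhileB a b input.toList)

-- ===== PRECONDITION & SPEC =====
-- A raises IndexError (target_pair[1]) when input is nonempty and target_pair has fewer
-- than 2 characters; Pre_ excludes exactly those inputs.
def Pre_remove_substring (input : String) (target_pair : String) : Prop :=
  input = "" ∨ 2 ≤ PySem.Str.len target_pair
instance (input : String) (target_pair : String) : Decidable (Pre_remove_substring input target_pair) := by unfold Pre_remove_substring; infer_instance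

def pvWitness_remove_substring : String × String := ("cabbage", "ab")

def Spec_remove_substring (input : String) (target_pair : String) (out : String) : Prop := out = remove_substring_alt input target_pair
instance (input : String) (target_pair : String) (out : String) : Decidable (Spec_remove_substring input target_pair out) := by unfold Spec_remove_substring; infer_instance

-- ===== CLAIM (what is proved, stated in full; the proofs are below) =====
def Claim_equal_remove_substring : Prop := ∀ (input : String) (target_pair : String), Dom_remove_substring input target_pair → Pre_remove_substring input target_pair → Spec_remove_substring input target_pair (remove_substring input target_pair)

-- ===== LEMMAS AND PROOFS =====
-- proof-side normal form: the right-fold single-pass reduction; both ports equal pvRed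
def pvStep (a b c : Char) (r : List Char) : List Char :=
  if c = a ∧ r.head? = some b then r.tail else c :: r

def pvRed (a b : Char) : List Char → List Char
  | [] => []
  | c :: cs => pvStep a b c (pvRed a b cs)

theorem pvOcc_red_false (a b : Char) : ∀ l : List Char, pvOcc a b (pvRed a b l) = false := by
  intro l
  induction l with
  | nil => simp [pvRed, pvOcc]
  | cons c cs ih =>
    simp only [pvRed, pvStep]
    split_ifs with hc
    · rcases hr : pvRed a b cs with _ | ⟨rh, rt⟩
      · simp [pvOcc]
      · rw [hr] at ih
        simp only [pvOcc, Bool.or_eq_false_iff] at ih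
        simpa using ih.2
    · by_cases h1 : c = a
      · by_cases h2 : (pvRed a b cs).head? = some b
        · exact absurd ⟨h1, h2⟩ hc
        · simp [pvOcc, ih, h2]
      · simp [pvOcc, ih, h1]


theorem pvRed_of_occ_false (a b : Char) : ∀ l : List Char, pvOcc a b l = false → pvRed a b l = l := by
  intro l
  induction l with
  | nil => intro _; rfl
  | cons c cs ih =>
    intro h
    simp only [pvOcc, Bool.or_eq_false_iff, Bool.and_eq_false_iff] at h
    rw [pvRed, ih h.2, pvStep, if_neg]
    rintro ⟨h1, h2⟩
    rcases h.1 with h3 | h3 <;> simp [h1, h2] at h3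


theorem pvRed_pair (a b : Char) (xs : List Char) : pvRed a b (a :: b :: xs) = pvRed a b xs := by
  have hnr := pvOcc_red_false a b xs
  simp only [pvRed]
  rcases hrr : pvRed a b xs with _ | ⟨rh, rt⟩
  · have hinner : pvStep a b b [] = [b] := by
      rw [pvStep, if_neg]
      rintro ⟨-, h⟩
      simp at h
    rw [hinner, pvStep, if_pos ⟨rfl, rfl⟩, List.tail_cons]
  · rw [hrr] at hnr
    simp only [pvOcc, Bool.or_eq_false_iff, Bool.and_eq_false_iff] at hnr
    by_cases hc : b = a ∧ rh = b
    · have hinner : pvStep a b b (rh :: rt) = rt := by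
        rw [pvStep, if_pos ⟨hc.1, by simp [hc.2]⟩, List.tail_cons]
      have houter : pvStep a b a rt = a :: rt := by
        rw [pvStep, if_neg]
        rintro ⟨-, h2⟩
        rcases hnr.1 with h3 | h3
        · rw [hc.2, hc.1] at h3
          simp at h3
        · rw [h2] at h3
          simp at h3
      rw [hinner, houter, hc.2, hc.1]
    · have hinner : pvStep a b b (rh :: rt) = b :: rh :: rt := by
        rw [pvStep, if_neg]
        rintro ⟨h1, h2⟩
        simp only [List.head?_cons, Option.some.injEq] at h2
        exact hc ⟨h1, h2⟩
      rw [hinner, pvStep, if_pos ⟨rfl, rfl⟩, List.tail_cons]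

theorem pvRed_append_pair (a b : Char) : ∀ (l xs : List Char),
    pvRed a b (l ++ a :: b :: xs) = pvRed a b (l ++ xs) := by
  intro l xs
  induction l with
  | nil => simpa using pvRed_pair a b xs
  | cons c t ih => simp only [List.cons_append, pvRed, ih]


theorem pvRed_repl (a b : Char) : ∀ l : List Char, pvRed a b (pvRepl a b l) = pvRed a b l := by
  intro l
  induction l using pvRepl.induct a b with
  | case1 c d rest hcd ih =>
    obtain ⟨h1, h2⟩ := hcd
    subst h1; subst h2
    rw [pvRepl, if_pos ⟨rfl, rfl⟩, ih, pvRed_pair]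
  | case2 c d rest hcd ih =>
    rw [pvRepl, if_neg hcd]
    simp only [pvRed, ih]
  | case3 l h1 =>
    rcases l with _ | ⟨c, _ | ⟨d, t⟩⟩
    · rfl
    · rfl
    · exact absurd rfl (h1 c d t)


theorem pvWhileB_eq_red (a b : Char) (l : List Char) : pvWhileB a b l = pvRed a b l := by
  induction l using pvWhileB.induct a b with
  | case1 l hocc ih => rw [pvWhileB, dif_pos hocc, ih, pvRed_repl]
  | case2 l hocc =>
    rw [pvWhileB, dif_neg hocc]
    exact (pvRed_of_occ_false a b l (by simpa using hocc)).symm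


theorem pvOcc_snoc (a b : Char) : ∀ (l : List Char) (c : Char),
    pvOcc a b (l ++ [c]) = (pvOcc a b l || (l.getLast? == some a && c == b)) := by
  intro l c
  induction l with
  | nil => simp [pvOcc]
  | cons d t ih =>
    simp only [List.cons_append, pvOcc, ih]
    rcases t with _ | ⟨e, u⟩
    · simp [pvOcc]
    · simp [Bool.or_assoc]


theorem pvLoopA_eq (a b : Char) : ∀ (cs st : List Char), pvOcc a b st.reverse = false →
    pvLoopA a b st cs = pvRed a b (st.reverse ++ cs) := by
  intro cs
  induction cs with
  | nil =>
    intro st h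
    rw [pvLoopA, List.append_nil, pvRed_of_occ_false a b _ h]
  | cons c cs ih =>
    intro st h
    rw [pvLoopA]
    split_ifs with hcond
    · obtain ⟨hcb, hhd⟩ := hcond
      rcases st with _ | ⟨s0, st'⟩
      · simp at hhd
      · simp only [List.head?_cons, Option.some.injEq] at hhd
        rw [List.tail_cons, hcb, hhd]
        rw [hhd] at h
        have h' : pvOcc a b st'.reverse = false := by
          rw [List.reverse_cons, pvOcc_snoc] at h
          exact (Bool.or_eq_false_iff.mp h).1
        rw [ih st' h', List.reverse_cons, List.append_assoc,
          List.singleton_append, pvRed_append_pair]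
    · have h' : pvOcc a b (c :: st).reverse = false := by
        rw [List.reverse_cons, pvOcc_snoc, Bool.or_eq_false_iff]
        refine ⟨h, ?_⟩
        rw [List.getLast?_reverse]
        rw [Bool.and_eq_false_iff]
        by_cases h1 : st.head? = some a
        · by_cases h2 : c = b
          · exact absurd ⟨h2, h1⟩ hcond
          · right; simpa using h2
        · left; simpa using h1
      rw [ih (c :: st) h', List.reverse_cons, List.append_assoc, List.singleton_append]


-- ===== VERDICT (by name: the statement is the Claim_ definition above) =====
theorem remove_substring_spec : Claim_equal_remove_substring := by
  intro input tp hdom hpre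
  unfold Spec_remove_substring remove_substring remove_substring_alt
  by_cases hemp : input = ""
  · subst hemp
    rfl
  · have hlen : 2 ≤ PySem.Str.len tp := hpre.resolve_left hemp
    have htl : input.toList ≠ [] := by
      intro hnil
      exact hemp (by rw [← input.ofList_toList, hnil])
    rcases hil : input.toList with _ | ⟨c, cs⟩
    · exact absurd hil htl
    · rcases htp : tp.toList with _ | ⟨x, _ | ⟨y, t⟩⟩
      · rw [PySem.Str.len_eq, htp] at hlen
        simp at hlen
      · rw [PySem.Str.len_eq, htp] at hlen
        simp at hlen
      · have h0 : PySem.Str.pyGet? tp 0 = some x := by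
          simp only [PySem.Str.pyGet?_eq, PySem.Chars.pyGet?_eq_listPyGet?, htp,
            PySem.List.pyGet?, PySem.List.pyIdx?]
          have hn : (0:Int) ≤ (t.length : Int) + 1 := by omega
          simp [hn]
        have h1 : PySem.Str.pyGet? tp 1 = some y := by
          simp only [PySem.Str.pyGet?_eq, PySem.Chars.pyGet?_eq_listPyGet?, htp,
            PySem.List.pyGet?, PySem.List.pyIdx?]
          simp
        rw [h0, h1]
        simp only [if_neg hemp]
        congr 1
        rw [pvWhileB_eq_red, ← hil]
        have := pvLoopA_eq x y input.toList [] (by simp [pvOcc])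
        rw [List.reverse_nil, List.nil_append] at this
        rw [hil] at this ⊢
        exact this
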